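-- pv_equiv track=rewrite | github.com/maxevg/Algorithms-and-data-structures | bioinformatics/bioinform6/fasta_algorithm.py | group_up
-- ===== SOURCE A (Python) =====
-- def group_up(seq, size=2):
--     groups = {}
--     for ind in range(len(seq) - size + 1):
--         if seq[ind:ind + size] in groups:
--             groups[seq[ind: ind + size]].append(ind)
--         else:
--             groups[seq[ind:ind + size]] = [ind]
--     return groups
-- ===== SOURCE B (Python) =====
-- def group_up(seq, size=2):
--     pairs = [(seq[i:i + size], i) for i in range(len(seq) - size + 1)]
--     keys = dict.fromkeys(kmer for kmer, _ in pairs)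
--     return {k: [i for s, i in pairs if s == k] for k in keys}
-- ===== Notes on version B (the rewrite author's own statement) =====
-- stated objective: alternative
-- what changed: Instead of A's single pass that grows per-key index lists in a dict, B materialises the (k-mer, index) pair list once, deduplicates the k-mers in first-occurrence order, and builds each group by a per-key scan of the pair list.
import Mathlib
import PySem

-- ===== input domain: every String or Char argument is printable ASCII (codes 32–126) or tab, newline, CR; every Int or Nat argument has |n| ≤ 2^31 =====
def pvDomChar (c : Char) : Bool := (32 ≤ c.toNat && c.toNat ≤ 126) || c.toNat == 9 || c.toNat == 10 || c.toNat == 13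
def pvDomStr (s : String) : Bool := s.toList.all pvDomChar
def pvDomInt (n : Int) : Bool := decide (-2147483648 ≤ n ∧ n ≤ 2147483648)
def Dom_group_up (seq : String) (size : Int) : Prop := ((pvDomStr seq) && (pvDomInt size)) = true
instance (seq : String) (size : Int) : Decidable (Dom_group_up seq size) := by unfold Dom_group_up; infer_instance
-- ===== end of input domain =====

-- B replaces A's incremental dict-of-lists with dedup-the-kmers then one filtering scan per distinct k-mer (alternative decomposition, not faster).


-- ===== PORT A =====
def group_up (seq : String) (size : Int) : List (String × List Int) :=
  let groups : PySem.Dict String (List Int) :=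
    (PySem.List.pyRange 0 (PySem.Str.len seq - size + 1) 1).foldl
      (fun g ind =>
        if g.contains (PySem.Str.slice seq (some ind) (some (ind + size))) then
          g.modify (PySem.Str.slice seq (some ind) (some (ind + size))) [] (fun v => v ++ [ind])
        else
          g.insert (PySem.Str.slice seq (some ind) (some (ind + size))) [ind])
      PySem.Dict.empty
  groups.items

-- ===== PORT B =====
def group_up_alt (seq : String) (size : Int) : List (String × List Int) :=
  let pairs : List (String × Int) :=
    (PySem.List.pyRange 0 (PySem.Str.len seq - size + 1) 1).map
      (fun i => (PySem.Str.slice seq (some i) (some (i + size)), i))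
  let keys : List String := PySem.List.dedup (pairs.map Prod.fst)
  keys.map (fun k => (k, (pairs.filter (fun p => p.1 == k)).map Prod.snd))

-- ===== PRECONDITION & SPEC =====
def Spec_group_up (seq : String) (size : Int) (out : List (String × List Int)) : Prop := out = group_up_alt seq size
instance (seq : String) (size : Int) (out : List (String × List Int)) : Decidable (Spec_group_up seq size out) := by unfold Spec_group_up; infer_instance

-- ===== CLAIM (what is proved, stated in full; the proofs are below) =====
def Claim_equal_group_up : Prop := ∀ (seq : String) (size : Int), Dom_group_up seq size → Spec_group_up seq size (group_up seq size)

-- ===== LEMMAS AND PROOFS =====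

-- A's branch "append if present, start [ind] if absent" is exactly Dict.modify with default [].
theorem pv_step_eq (g : PySem.Dict String (List Int)) (k : String) (i : Int) :
    (if g.contains k then g.modify k [] (fun v => v ++ [i]) else g.insert k [i])
      = g.modify k [] (fun v => v ++ [i]) := by
  by_cases h : g.contains k = true
  · simp [h]
  · simp only [h, if_false, Bool.false_eq_true]
    have h2 := h
    rw [PySem.Dict.contains_eq_isSome_get?] at h2
    simp [PySem.Dict.get?] at h2
    have hf : List.find? (fun p => p.1 == k) g.items = none := by
      rw [List.find?_eq_none]
      intro p hp
      simp only [beq_iff_eq]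
      intro hpk
      exact h2 p.2 (by rw [← hpk]; exact hp)
    simp [PySem.Dict.insert, PySem.Dict.modify, PySem.Dict.getD, PySem.Dict.get?, h, hf]

-- ===== VERDICT (by name: the statement is the Claim_ definition above) =====
theorem group_up_spec : Claim_equal_group_up := by
  intro seq size _
  unfold Spec_group_up group_up group_up_alt
  rw [show (fun (g : PySem.Dict String (List Int)) (ind : Int) =>
        if g.contains (PySem.Str.slice seq (some ind) (some (ind + size))) then
          g.modify (PySem.Str.slice seq (some ind) (some (ind + size))) [] (fun v => v ++ [ind])
        else
          g.insert (PySem.Str.slice seq (some ind) (some (ind + size))) [ind])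
      = (fun g ind => g.modify (PySem.Str.slice seq (some ind) (some (ind + size))) [] (fun v => v ++ [ind]))
      from funext fun g => funext fun ind => pv_step_eq g _ ind]
  simp only [PySem.List.dedup_eq_ofList]
  rw [show ((PySem.List.pyRange 0 (PySem.Str.len seq - size + 1) 1).foldl
      (fun (g : PySem.Dict String (List Int)) ind =>
        g.modify (PySem.Str.slice seq (some ind) (some (ind + size))) [] (fun v => v ++ [ind]))
      PySem.Dict.empty)
    = (((PySem.List.pyRange 0 (PySem.Str.len seq - size + 1) 1).map
        (fun i => (PySem.Str.slice seq (some i) (some (i + size)), i))).foldl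
      (fun (g : PySem.Dict String (List Int)) p => g.modify p.1 [] (fun v => v ++ [p.2]))
      PySem.Dict.empty) from by simp only [List.foldl_map]]
  set pairs := (PySem.List.pyRange 0 (PySem.Str.len seq - size + 1) 1).map
        (fun i => (PySem.Str.slice seq (some i) (some (i + size)), i)) with hp
  have hnd : (pairs.foldl (fun (g : PySem.Dict String (List Int)) p =>
      g.modify p.1 [] (fun v => v ++ [p.2])) PySem.Dict.empty).keys.Nodup :=
    PySem.Dict.nodup_keys_foldl_modify_key pairs Prod.fst [] (fun _ p => (fun v => v ++ [p.2])) _ PySem.Dict.nodup_keys_empty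
  rw [PySem.Dict.items_eq_map_keys _ hnd []]
  rw [PySem.Dict.keys_foldl_modify_key]
  simp only [PySem.Dict.keys_empty]
  congr 1
  funext k
  rw [PySem.Dict.getD_foldl_modify_append]
  simp [PySem.Dict.getD_empty]
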